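/- GENERATED by mk_final_copies.py from the proof of the farm's unit `compute_bitreverse` (farm:compute_bitreverse.1: Proof.lean) as the
   re-elaboration sweep compiled it — do not edit. -/
import Asan.CheckWalk
import Vorbis.Spec.Units.compute_bitreverse
import Vorbis.Spec.Worked.compute_bitreverse_Lemmas

open X86 X86.User Asan Vorbis

set_option maxRecDepth 4000
set_option maxHeartbeats 4000000

/-- `compute_bitreverse(n, rev)` satisfies its contract (stb_vorbis_fixed.c 1305-1311). Six pushes and `sub rsp, 8`; the call of
`ilog` (0x1048f4: with SH7 its value is `k + 1`, so `r13d = ld = k`); the loop at 0x104936 counted by `ebp = i` up to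
`r12d = n / 8`, whose body calls `bit_reverse` (0x10490a: its value `x` is opaque), checks `&rev[i]` (0x10492a:
`__asan_store2_noabort`, inside the live table) and stores `(x >> (35 - k)) << 2` there: the invariant `Mdct.RevUpTo` (M4 for the
entries below `i`) moves on by `Mdct.RevUpTo.step_value`, whatever `x` is; the exit pops the six registers and returns. The pure
facts (the walker's bit-level terms as numbers) are in Lemmas.lean. -/
theorem Vorbis.Spec.Worked.compute_bitreverse_ok : Vorbis.Spec.compute_bitreverse.Statement := by
  intro Lay hLay μ hμ u₀ hcode h_ilog h_br hstore2 others frames k u ret he hpre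
  v_entry he
  obtain ⟨hsh, hld, hlive, hlog, hlogin⟩ := hpre
  have h_ilog' := h_ilog others frames
  have h_br' := h_br others frames
  have hsp := hsh.rsp
  -- the argument `n` as a number: a block size, `64 ≤ n ≤ 8192`
  obtain ⟨n, hn⟩ : ∃ n, Spec.arg32 u .rdi = n := ⟨_, rfl⟩
  rw [hn] at hld hlive
  have hx : (u.reg .rdi).toNat % 2 ^ 32 = n := by
    rw [← Spec.arg32_def]
    exact hn
  have hnf := hld.isBlocksize.facts
  have hk6 := hld.ge
  have hk13 := hld.le
  -- where the table `rev` is: one arithmetic fact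
  have hwhere := hlive.where_ hsh.inv hsh.offText (by omega) (by omega)
  -- 0x1048e0 … 0x1048f4: the pushes, up to the call of `ilog` (C line 1307)
  u_walk hcode [hμ.vendor] until [Vorbis.L.compute_bitreverse.loop1] span [Vorbis.L.textLo, Vorbis.L.textHi] side (v_side)
  · -- call_inv: DF and the MXCSR masks at the entry of `ilog`
    v_inv
  · -- the precondition of `ilog`: the shadow clause (seven stack stores so far), `log2_4` is a live object
    refine ⟨?_, hlog⟩
    show ShadowPre others frames s_1048f4
    refine hsh.callee ?_ ?_ ?_ ?_
    · v_untouched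
    · rw [w_rsp]
      u_omega
    · rw [w_rsp]
      u_omega
    · rw [w_rsp]
      u_omega
  · -- 0x1048f9: after the return of `ilog`. First the six save slots and SH7 at the callee's entry …
    have hp1 : UInt64.ofNat (s_1048f4.mem.readLE (u.reg .rsp - 8) 8) = u.reg .r15 := by u_resolve
    have hp2 : UInt64.ofNat (s_1048f4.mem.readLE (u.reg .rsp - 16) 8) = u.reg .r14 := by u_resolve
    have hp3 : UInt64.ofNat (s_1048f4.mem.readLE (u.reg .rsp - 24) 8) = u.reg .r13 := by u_resolve
    have hp4 : UInt64.ofNat (s_1048f4.mem.readLE (u.reg .rsp - 32) 8) = u.reg .r12 := by u_resolve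
    have hp5 : UInt64.ofNat (s_1048f4.mem.readLE (u.reg .rsp - 40) 8) = u.reg .rbp := by u_resolve
    have hp6 : UInt64.ofNat (s_1048f4.mem.readLE (u.reg .rsp - 48) 8) = u.reg .rbx := by u_resolve
    have hlog' : Spec.Log2_4In s_1048f4.mem := by
      refine Vorbis.Spec.compute_bitreverse.log2_4In_eqOn hlogin ?_
      rw [w_mem_1048f4]
      u_eqon
    rw [w_mem_1048f4] at hp1 hp2 hp3 hp4 hp5 hp6
    -- … then what the contract of `ilog` says: the value `k + 1` (SH7), and its footprint (32 bytes below its return address)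
    v_after_call w_rsp_1048f4 w_mem_1048f4
    obtain ⟨hun1, -, hval⟩ := w_post
    have hrdi : s_1048f4.reg .rdi = u.reg .rdi := w_kept_1048f4.get .rdi rfl
    have hz : (s_1048f4r.reg .rax).toNat = k + 1 := by
      rw [hval hlog', hrdi]
      exact Vorbis.Spec.compute_bitreverse.ilogVal_ld _ hx hld
    obtain ⟨z, w_rax⟩ : ∃ z, s_1048f4r.reg .rax = z := ⟨_, rfl⟩
    rw [w_rax] at hz
    -- the return address and the six save slots, carried over the callee's footprint
    have hs0 : UInt64.ofNat (s_1048f4r.mem.readLE (u.reg .rsp) 8) = ret := by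
      u_frame he_retAddr
    have hs1 : UInt64.ofNat (s_1048f4r.mem.readLE (u.reg .rsp - 8) 8) = u.reg .r15 := by
      u_frame hp1
    have hs2 : UInt64.ofNat (s_1048f4r.mem.readLE (u.reg .rsp - 16) 8) = u.reg .r14 := by
      u_frame hp2
    have hs3 : UInt64.ofNat (s_1048f4r.mem.readLE (u.reg .rsp - 24) 8) = u.reg .r13 := by
      u_frame hp3
    have hs4 : UInt64.ofNat (s_1048f4r.mem.readLE (u.reg .rsp - 32) 8) = u.reg .r12 := by
      u_frame hp4
    have hs5 : UInt64.ofNat (s_1048f4r.mem.readLE (u.reg .rsp - 40) 8) = u.reg .rbp := by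
      u_frame hp5
    have hs6 : UInt64.ofNat (s_1048f4r.mem.readLE (u.reg .rsp - 48) 8) = u.reg .rbx := by
      u_frame hp6
    -- (`hun` BEFORE `hsame`: with a second `Mem.SameExcept` about this memory in the context, `v_untouched` fails here)
    have hun : ShadowUntouched u.mem s_1048f4r.mem := by v_untouched
    have hsame : Mem.SameExcept [⟨(u.reg .rsp).toNat - 96, (u.reg .rsp).toNat⟩,
        ⟨(u.reg .rsi).toNat, (u.reg .rsi).toNat + n / 4⟩] u.mem s_1048f4r.mem := by
      u_same
    -- 0x1048f9 … 0x104906: `ld = ilog(n) - 1`, `n8 = n >> 3`, `i = 0`, the jump to the loop head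
    u_walk hcode [hμ.vendor] until [Vorbis.L.compute_bitreverse.loop1] span [Vorbis.L.textLo, Vorbis.L.textHi] side (v_side)
    -- THE LOOP HEAD 0x104936 (C line 1309 `for (i=0; i < n8; ++i)`): `ebp = i ≤ n / 8`, `r13d = k`, `r12d = n / 8`, the entries
    -- below `i` satisfy M4's bound; the exact memory is replaced by what stays true
    obtain ⟨i, hi, hile, hrev⟩ : ∃ i : Nat, s_104906.reg .rbp = Word.ofBV (BitVec.ofNat 32 i) ∧ i ≤ n / 8 ∧
        Mdct.RevUpTo s_104906.mem (u.reg .rsi).toNat n i :=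
      ⟨0, w_rbp, Nat.zero_le _, Mdct.RevUpTo.zero _ _ _⟩
    have hr13 : s_104906.reg .r13 = Word.ofBV (BitVec.ofNat 32 k) := by
      rw [w_r13, Vorbis.Spec.compute_bitreverse.lea_sub1 z k hz]
    have hr12 : s_104906.reg .r12 = Word.ofBV (BitVec.ofNat 32 (n / 8)) := by
      rw [w_r12, Vorbis.Spec.compute_bitreverse.sar3 _ n hx (by omega)]
    rw [← w_mem] at hs0 hs1 hs2 hs3 hs4 hs5 hs6 hsame hun
    have hdf : s_104906.flags .df = false := by
      rw [w_flags]
      simp only [X86.User.df_setStatus]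
      exact w_df
    have hmx : s_104906.mxcsr &&& 0x1F80 = 0x1F80 := by
      rw [w_mxcsr]
      exact w_mx
    replace w_kept := w_kept.mono_all (S' := [.rbp, .r13, .r14, .r12, .rsp, .rax, .rcx, .rdx, .rsi, .rdi, .r8, .r9, .r10,
      .r11, .r16, .r17, .r18, .r19, .r20, .r21, .r22, .r23, .r24, .r25, .r26,
      .r27, .r28, .r29, .r30, .r31, .rbx, .r15]) (by rfl)
    clear w_mem w_flags w_mxcsr w_rbp w_r13 w_r12 w_rax hz hval hun1 w_same w_code w_inv w_df w_mx w_sse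
    clear hp1 hp2 hp3 hp4 hp5 hp6 hlog' hrdi
    u_loop [i] (fun v => n / 8 - (v.reg .rbp).toNat)
    -- 0x104936 `cmp ebp, r12d ; jl`: the body up to the call of `bit_reverse` (0x10490a), and the exit path up to the `ret`
    u_walk hcode [hμ.vendor] until [Vorbis.L.compute_bitreverse.loop1] span [Vorbis.L.textLo, Vorbis.L.textHi] side (v_side)
    · -- call_inv: DF and the MXCSR masks at the entry of `bit_reverse`
      v_inv
    · -- the precondition of `bit_reverse`: the shadow clause
      show ShadowPre others frames s_10490a
      refine hsh.callee ?_ ?_ ?_ ?_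
      · v_untouched
      · rw [w_rsp]
        u_omega
      · rw [w_rsp]
        u_omega
      · rw [w_rsp]
        u_omega
    · -- 0x10490f: after the return of `bit_reverse` (C line 1310): its contract says the memory is that of its entry; its
      -- value `x` is opaque
      have w_mem : s_10490ar.mem = s_104906.mem.writeLE (u.reg Reg.rsp - 64) 8 1067279 :=
        (show s_10490ar.mem = s_10490a.mem from w_post).trans w_mem_10490a
      have w_eq := Vorbis.conv_code_eqOn w_code
      have w_df := (show X86.User.abiInv _ from w_inv).1
      have w_mx := (show X86.User.abiInv _ from w_inv).2
      have w_sse := Vorbis.sseOK_of_abiInv w_inv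
      clear w_same w_post
      obtain ⟨x, w_rax⟩ : ∃ x, s_10490ar.reg .rax = x := ⟨_, rfl⟩
      -- the branch taken at 0x104939 (`jl`, signed): `i < n / 8`
      have hlt : i < n / 8 := by
        rw [Vorbis.Spec.compute_bitreverse.toInt_small i (by omega),
          Vorbis.Spec.compute_bitreverse.toInt_small (n / 8) (by omega)] at hbr_104939
        exact_mod_cast hbr_104939
      -- `&rev[i]` (r15, rdi) as a number
      have haddr := Vorbis.Spec.compute_bitreverse.slot_addr (u.reg .rsi) i (by omega) (by omega)
      have haddrN : (u.reg .rsi + Word.ofBV (BitVec.signExtend 64 (BitVec.ofNat 32 i)) * 2).toNat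
          = (u.reg .rsi).toNat + 2 * i := by
        rw [haddr]
        exact toNat_addr _ (by omega)
      -- 0x10490f … 0x104933: the shift, the check, the store, `++i`, back to the loop head
      u_walk hcode [hμ.vendor] until [Vorbis.L.compute_bitreverse.loop1] span [Vorbis.L.textLo, Vorbis.L.textHi] side (v_side)
      · -- check_10492a (`__asan_store2_noabort`, C line 1310): `rev[i]`, `i < n / 8`, lies inside the `n / 4` live bytes at `rev`
        have hun' : ShadowUntouched u.mem s_10492a.mem := by v_untouched
        refine hlive.accSmall hsh.inv hun' _ 2 (by decide) ?_ ?_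
        · rw [haddrN]
          omega
        · rw [haddrN]
          omega
      · -- the back edge 0x104933 → 0x104936: the invariant for `i + 1`
        u_loop_back [i + 1]
        · -- still no store to the shadow
          v_untouched
        · -- `add ebp, 1`
          rw [w_rbp, Vorbis.Spec.compute_bitreverse.ebp_inc]
        · omega
        · -- the entries below `i + 1`: the two return addresses went below the frame, the store wrote `rev[i]`
          rw [w_mem, haddr, Vorbis.Spec.compute_bitreverse.stored_value x k hk6 hk13]
          refine Mdct.RevUpTo.step_value (Vorbis.Spec.compute_bitreverse.revUpTo_eqOn hrev ?_ (by omega)) hld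
            (Nat.mod_lt _ (by decide)) (by omega)
          u_eqon
        · -- the direction flag: the check kept it, the `add` wrote status flags only
          rw [w_flags]
          simp only [X86.User.df_setStatus]
          exact w_df_10492a
        · rw [w_mxcsr]
          exact w_mx
        · -- the measure
          rw [w_rbp, Vorbis.Spec.compute_bitreverse.ebp_inc, Vorbis.Spec.compute_bitreverse.toNat_reg32 _ (by omega),
            Vorbis.Spec.compute_bitreverse.toNat_reg32 _ (by omega)]
          omega
    · -- the exit 0x10493b … 0x104949 (C line 1311), walked to the `ret`: the contract's `Returned`
      refine ReachVia.done (Or.inl ?_)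
      v_returned
      refine ⟨?_, ?_⟩
      · -- no shadow byte was written
        rw [w_mem]
        exact hun
      · -- M4 for this table: the loop ended at `i = n / 8`
        rw [hn, w_mem]
        have hge : n / 8 ≤ i := by
          rw [Vorbis.Spec.compute_bitreverse.toInt_small i (by omega),
            Vorbis.Spec.compute_bitreverse.toInt_small (n / 8) (by omega)] at hbr_104939
          have h' : ¬ (i < n / 8) := by exact_mod_cast hbr_104939
          omega
        have hie : i = n / 8 := by omega
        rw [hie] at hrev
        exact hrev.done
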